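-- pv_equiv track=rewrite | github.com/Jake-Brunning/advent-of-code-day2 | day2.py | checkInBounds
-- ===== SOURCE A (Python) =====
-- def checkInBounds(input: list[int], removedYet: int):
--     LB = 1 #inclusive
--     UP = 3 #inclusive
--
--     for i in range(1, len(input)):
--         difference = abs(input[i-1] - input[i])
--         if (difference < LB or difference > UP and removedYet == -1):
--
--             del input[i]
--             return checkInBounds(input, i)
--
--         elif(difference < LB or difference > UP):
--             return False, -1
--
--     return True, removedYet
-- ===== SOURCE B (Python) =====
-- def checkInBounds(input: list[int], removedYet: int):
--     LB = 1  # inclusive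
--     UP = 3  # inclusive
--     i = 1
--     while i < len(input):
--         difference = abs(input[i - 1] - input[i])
--         if difference < LB or (difference > UP and removedYet == -1):
--             del input[i]
--             removedYet = i
--             i = 1
--         elif difference < LB or difference > UP:
--             return False, -1
--         else:
--             i += 1
--     return True, removedYet
-- ===== Notes on version B (the rewrite author's own statement) =====
-- stated objective: simpler
-- what changed: Replaced the restart-by-recursion with a single iterative while loop that deletes in place, records the deletion index in a local removedYet and resets the scan index to 1, eliminating recursion entirely.
import Mathlib
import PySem

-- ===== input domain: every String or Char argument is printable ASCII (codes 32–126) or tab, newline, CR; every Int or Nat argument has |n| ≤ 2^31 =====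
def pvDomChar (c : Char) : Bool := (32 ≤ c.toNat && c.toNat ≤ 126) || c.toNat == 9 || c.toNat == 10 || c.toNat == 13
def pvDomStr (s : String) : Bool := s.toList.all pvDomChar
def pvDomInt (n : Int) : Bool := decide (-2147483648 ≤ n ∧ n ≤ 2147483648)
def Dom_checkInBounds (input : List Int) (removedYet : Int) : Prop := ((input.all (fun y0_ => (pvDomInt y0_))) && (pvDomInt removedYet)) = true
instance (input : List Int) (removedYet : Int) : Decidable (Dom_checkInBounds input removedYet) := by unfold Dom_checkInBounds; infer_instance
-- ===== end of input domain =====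

-- B replaces A's restart-by-recursion with one in-place while loop (no recursion); both mutate
-- the passed list identically in Python; the equivalence proved is about the RETURN value.
-- All list indexing below is in range (1 ≤ i < length), so getD is exact for Python's input[i].

-- ===== PORT A =====
-- A's `for i in range(1, len(input))` loop: returns .inl i when the loop body does
-- `del input[i]` and recurses, .inr r when it returns r.
def pvAScan (input : List Int) (removedYet : Int) (i : Nat) : Sum Nat (Bool × Int) :=
  if i < input.length then
    let difference := |input.getD (i - 1) 0 - input.getD i 0|
    if difference < 1 ∨ (difference > 3 ∧ removedYet = -1) then Sum.inl i
    else if difference < 1 ∨ difference > 3 then Sum.inr (false, -1)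
    else pvAScan input removedYet (i + 1)
  else Sum.inr (true, removedYet)
termination_by input.length - i

theorem pvAScan_inl_lt (input : List Int) (removedYet : Int) (i j : Nat)
    (h : pvAScan input removedYet i = Sum.inl j) : j < input.length := by
  fun_induction pvAScan input removedYet i with
  | case1 i hlt d h1 => simp_all
  | case2 => simp_all
  | case3 i hlt d h1 h2 ih => exact ih h
  | case4 => simp_all

def checkInBounds (input : List Int) (removedYet : Int) : Bool × Int :=
  match h : pvAScan input removedYet 1 with
  | Sum.inl i => checkInBounds (input.eraseIdx i) (i : Int)
  | Sum.inr r => r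
termination_by input.length
decreasing_by
  have := pvAScan_inl_lt input removedYet 1 i h
  simp [List.length_eraseIdx, this]; omega

-- ===== PORT B =====
-- B's while loop: state is the (mutated) list, the local removedYet and the index i.
def pvBLoop (input : List Int) (removedYet : Int) (i : Nat) : Bool × Int :=
  if h : i < input.length then
    let difference := |input.getD (i - 1) 0 - input.getD i 0|
    if difference < 1 ∨ (difference > 3 ∧ removedYet = -1) then
      pvBLoop (input.eraseIdx i) (i : Int) 1
    else if difference < 1 ∨ difference > 3 then (false, -1)
    else pvBLoop input removedYet (i + 1)
  else (true, removedYet)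
termination_by (input.length, input.length - i)
decreasing_by
  · exact Prod.Lex.left _ _ (by simpa [List.length_eraseIdx, h] using Nat.sub_lt (Nat.pos_of_ne_zero (by omega)) Nat.one_pos)
  · exact Prod.Lex.right _ (by omega)

def checkInBounds_alt (input : List Int) (removedYet : Int) : Bool × Int :=
  pvBLoop input removedYet 1

-- ===== PRECONDITION & SPEC =====
def Spec_checkInBounds (input : List Int) (removedYet : Int) (out : Bool × Int) : Prop := out = checkInBounds_alt input removedYet
instance (input : List Int) (removedYet : Int) (out : Bool × Int) : Decidable (Spec_checkInBounds input removedYet out) := by unfold Spec_checkInBounds; infer_instance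

-- ===== CLAIM (what is proved, stated in full; the proofs are below) =====
def Claim_equal_checkInBounds : Prop := ∀ (input : List Int) (removedYet : Int), Dom_checkInBounds input removedYet → Spec_checkInBounds input removedYet (checkInBounds input removedYet)

-- ===== LEMMAS AND PROOFS =====

-- B's loop, started at any index, does what A's scan decides: either it reaches a
-- deletion (and restarts at 1 on the shortened list) or it returns A's resulting pair.
theorem pvBLoop_eq_scan (input : List Int) (removedYet : Int) (i : Nat) :
    pvBLoop input removedYet i =
      match pvAScan input removedYet i with
      | Sum.inl j => pvBLoop (input.eraseIdx j) (j : Int) 1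
      | Sum.inr r => r := by
  fun_induction pvAScan input removedYet i with
  | case1 i hlt d h1 =>
      rw [pvBLoop]; simp only [hlt, dif_pos]; rw [if_pos h1]
  | case2 i hlt d h1 h2 =>
      rw [pvBLoop]; simp only [hlt, dif_pos]; rw [if_neg h1, if_pos h2]
  | case3 i hlt d h1 h2 ih =>
      rw [pvBLoop]; simp only [hlt, dif_pos]; rw [if_neg h1, if_neg h2]; exact ih
  | case4 i hge =>
      rw [pvBLoop]; simp only [hge, dif_neg, not_false_iff]

theorem checkInBounds_eq_alt (input : List Int) (removedYet : Int) :
    checkInBounds input removedYet = checkInBounds_alt input removedYet := by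
  fun_induction checkInBounds input removedYet with
  | case1 input removedYet i h ih =>
      unfold checkInBounds_alt at ih ⊢
      rw [pvBLoop_eq_scan, h]; exact ih
  | case2 input removedYet r h =>
      unfold checkInBounds_alt
      rw [pvBLoop_eq_scan, h]

-- ===== VERDICT (by name: the statement is the Claim_ definition above) =====
theorem checkInBounds_spec : Claim_equal_checkInBounds := by
  intro input removedYet _
  unfold Spec_checkInBounds
  exact checkInBounds_eq_alt input removedYet
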